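-- pv_equiv track=rewrite | github.com/Tobitob999/ARS | scripts/map_generator.py | _validate_connectivity
-- ===== SOURCE A (Python) =====
-- import collections
--
-- def _validate_connectivity(terrain: list[list[str]],
--                            exit_positions: list[tuple[int, int]]) -> bool:
--     """BFS: Prueft ob alle Exits untereinander erreichbar sind."""
--     if len(exit_positions) < 2:
--         return True
--
--     h = len(terrain)
--     w = len(terrain[0]) if terrain else 0
--     walkable = {"floor", "door", "water"}
--
--     start = exit_positions[0]
--     visited: set[tuple[int, int]] = set()
--     queue = collections.deque([start])
--     visited.add(start)
--
--     while queue: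
--         x, y = queue.popleft()
--         for dx, dy in ((1, 0), (-1, 0), (0, 1), (0, -1)):
--             nx, ny = x + dx, y + dy
--             if 0 <= nx < w and 0 <= ny < h and (nx, ny) not in visited:
--                 if terrain[ny][nx] in walkable:
--                     visited.add((nx, ny))
--                     queue.append((nx, ny))
--
--     for ex, ey in exit_positions:
--         if (ex, ey) not in visited:
--             return False
--     return True
-- ===== SOURCE B (Python) =====
-- def _validate_connectivity(terrain: list[list[str]],
--                            exit_positions: list[tuple[int, int]]) -> bool:
--     """Round-based saturation: repeatedly sweep the whole grid, adding every
--     walkable cell adjacent to the reached set, until a sweep adds nothing."""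
--     if len(exit_positions) < 2:
--         return True
--
--     h = len(terrain)
--     w = len(terrain[0]) if terrain else 0
--     walkable = {"floor", "door", "water"}
--
--     reach = {exit_positions[0]}
--     for _ in range(w * h):
--         new = {(x, y)
--                for y in range(h) for x in range(w)
--                if (x, y) not in reach
--                and terrain[y][x] in walkable
--                and any((x + dx, y + dy) in reach
--                        for dx, dy in ((1, 0), (-1, 0), (0, 1), (0, -1)))}
--         if not new:
--             break
--         reach |= new
--     return all(e in reach for e in exit_positions)
-- ===== Notes on version B (the rewrite author's own statement) =====
-- stated objective: alternative
-- what changed: Replaces the deque-based BFS flood fill with a queue-free round-based saturation: repeatedly sweep the whole grid and add every walkable cell 4-adjacent to the reached set until a sweep adds nothing, then test all exits for membership with all().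
-- outside the precondition, e.g. on _validate_connectivity([['floor', 'wall'], ['wall']], [(0, 0), (1, 0)]): A returns False, B raises IndexError
import Mathlib
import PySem

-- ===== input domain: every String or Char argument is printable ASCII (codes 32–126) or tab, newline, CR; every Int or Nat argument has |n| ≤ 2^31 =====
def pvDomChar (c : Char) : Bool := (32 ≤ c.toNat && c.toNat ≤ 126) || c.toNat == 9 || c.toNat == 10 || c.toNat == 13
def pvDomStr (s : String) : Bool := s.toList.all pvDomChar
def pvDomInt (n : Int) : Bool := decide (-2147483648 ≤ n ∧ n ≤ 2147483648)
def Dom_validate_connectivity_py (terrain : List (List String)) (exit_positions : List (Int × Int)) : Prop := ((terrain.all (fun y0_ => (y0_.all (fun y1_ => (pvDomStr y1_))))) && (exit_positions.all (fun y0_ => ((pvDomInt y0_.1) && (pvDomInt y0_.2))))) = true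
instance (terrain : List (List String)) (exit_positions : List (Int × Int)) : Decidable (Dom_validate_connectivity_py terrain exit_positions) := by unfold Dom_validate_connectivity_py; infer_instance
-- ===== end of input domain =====

-- B replaces A's deque-based BFS flood fill by a queue-free round-based saturation sweep
-- (objective: alternative, not faster); equivalence of the two is proved on rectangular terrain.

-- ===== PORT A =====

-- shared trivial accessors mirroring the Python expressions both versions contain:
-- `terrain[y][x]` (exact whenever 0 ≤ y < len(terrain) and 0 ≤ x < len(terrain[y]),
-- which the bounds guards plus Pre_'s rectangularity guarantee) and `in walkable`.
def pvCell (terrain : List (List String)) (x y : Int) : String :=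
  (PySem.List.pyGet? ((PySem.List.pyGet? terrain y).getD []) x).getD ""

def pvWalk (s : String) : Bool := ["floor", "door", "water"].contains s

def pvDirs : List (Int × Int) := [(1, 0), (-1, 0), (0, 1), (0, -1)]

-- in-grid cells, and the count of cells not yet visited (termination measure only)
def pvCells (w h : Int) : List (Int × Int) :=
  (PySem.List.pyRange 0 h).flatMap (fun y => (PySem.List.pyRange 0 w).map (fun x => (x, y)))

lemma mem_pvCells {w h : Int} {c : Int × Int} :
    c ∈ pvCells w h ↔ 0 ≤ c.1 ∧ c.1 < w ∧ 0 ≤ c.2 ∧ c.2 < h := by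
  simp only [pvCells, List.mem_flatMap, List.mem_map, PySem.List.mem_pyRange_one]
  constructor
  · rintro ⟨y, hy, x, hx, rfl⟩; exact ⟨hx.1, hx.2, hy.1, hy.2⟩
  · rintro ⟨h1, h2, h3, h4⟩
    exact ⟨c.2, ⟨h3, h4⟩, c.1, ⟨h1, h2⟩, rfl⟩

def pvUnvis (w h : Int) (v : PySem.Set (Int × Int)) : Nat :=
  (pvCells w h).countP (fun c => ! PySem.Set.contains v c)

-- one neighbour probe of A's inner `for dx, dy in …` loop
def pvBfsStep (terrain : List (List String)) (w h x y : Int)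
    (st : PySem.Set (Int × Int) × List (Int × Int)) (d : Int × Int) :
    PySem.Set (Int × Int) × List (Int × Int) :=
  let nx := x + d.1
  let ny := y + d.2
  if 0 ≤ nx ∧ nx < w ∧ 0 ≤ ny ∧ ny < h ∧ PySem.Set.contains st.1 (nx, ny) = false then
    if pvWalk (pvCell terrain nx ny) then
      (PySem.Set.add st.1 (nx, ny), st.2 ++ [(nx, ny)])
    else st
  else st

-- termination helpers for the BFS while-loop (cited by pvBfsLoop's decreasing_by)
lemma pvCountPLt {α : Type} (l : List α) (p p' : α → Bool)
    (himp : ∀ x, p' x = true → p x = true) (c : α) (hc : c ∈ l)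
    (hpc : p c = true) (hp'c : p' c = false) : l.countP p' < l.countP p := by
  induction l with
  | nil => simp at hc
  | cons a t ih =>
    rcases List.mem_cons.1 hc with rfl | hct
    · have h1 : t.countP p' ≤ t.countP p := List.countP_mono_left (fun x _ => himp x)
      simp [hpc, hp'c]
      omega
    · have ht := ih hct
      rw [List.countP_cons, List.countP_cons]
      by_cases hpa : p' a = true
      · simp [hpa, himp a hpa]; omega
      · simp only [Bool.not_eq_true] at hpa
        simp [hpa]
        split <;> omega

lemma pvBfsStep_measure (terrain : List (List String)) (w h x y : Int)
    (st : PySem.Set (Int × Int) × List (Int × Int)) (d : Int × Int) :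
    (pvBfsStep terrain w h x y st d).2.length + pvUnvis w h (pvBfsStep terrain w h x y st d).1 ≤
      st.2.length + pvUnvis w h st.1 := by
  simp only [pvBfsStep]
  split_ifs with h1 h2
  · obtain ⟨hx0, hxw, hy0, hyh, hcont⟩ := h1
    simp only [List.length_append, List.length_cons, List.length_nil]
    have hlt : pvUnvis w h (PySem.Set.add st.1 (x + d.1, y + d.2)) < pvUnvis w h st.1 := by
      apply pvCountPLt _ _ _ ?mono (x + d.1, y + d.2) ?memc ?pc ?p'c
      case mono =>
        intro z hz
        simp only [Bool.not_eq_true'] at hz ⊢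
        rcases hcz : PySem.Set.contains st.1 z with h | h
        · rfl
        · exfalso
          have : z ∈ PySem.Set.add st.1 (x + d.1, y + d.2) :=
            (PySem.Set.mem_add _ _ _).2 (Or.inl ((PySem.Set.contains_iff _ _).1 hcz))
          rw [(PySem.Set.contains_iff _ _).2 this] at hz
          simp at hz
      case memc =>
        rw [mem_pvCells]
        exact ⟨hx0, hxw, hy0, hyh⟩
      case pc =>
        simp only [Bool.not_eq_true']
        exact hcont
      case p'c =>
        have hmem : (x + d.1, y + d.2) ∈ PySem.Set.add st.1 (x + d.1, y + d.2) :=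
          (PySem.Set.mem_add _ _ _).2 (Or.inr rfl)
        show (!PySem.Set.contains (PySem.Set.add st.1 (x + d.1, y + d.2)) (x + d.1, y + d.2)) = false
        rw [(PySem.Set.contains_iff _ _).2 hmem]
        rfl
    omega
  · exact le_refl _
  · exact le_refl _

lemma pvBfsFold_measure (terrain : List (List String)) (w h x y : Int)
    (ds : List (Int × Int)) (st : PySem.Set (Int × Int) × List (Int × Int)) :
    (ds.foldl (pvBfsStep terrain w h x y) st).2.length +
        pvUnvis w h (ds.foldl (pvBfsStep terrain w h x y) st).1 ≤
      st.2.length + pvUnvis w h st.1 := by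
  induction ds generalizing st with
  | nil => exact le_refl _
  | cons d ds ih =>
    rw [List.foldl_cons]
    exact le_trans (ih (pvBfsStep terrain w h x y st d)) (pvBfsStep_measure terrain w h x y st d)

-- A's `while queue:` loop
def pvBfsLoop (terrain : List (List String)) (w h : Int)
    (visited : PySem.Set (Int × Int)) (queue : List (Int × Int)) : PySem.Set (Int × Int) :=
  match queue with
  | [] => visited
  | (x, y) :: rest =>
      let st := pvDirs.foldl (pvBfsStep terrain w h x y) (visited, rest)
      pvBfsLoop terrain w h st.1 st.2
termination_by queue.length + pvUnvis w h visited
decreasing_by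
  have hm : (List.foldl (pvBfsStep terrain w h x y) (visited, rest) pvDirs).2.length +
      pvUnvis w h (List.foldl (pvBfsStep terrain w h x y) (visited, rest) pvDirs).1 ≤
      rest.length + pvUnvis w h visited := pvBfsFold_measure terrain w h x y pvDirs (visited, rest)
  simp only [List.length_cons]
  omega

-- A's final `for ex, ey in exit_positions:` early-return loop
def pvCheckExits (visited : PySem.Set (Int × Int)) : List (Int × Int) → Bool
  | [] => true
  | e :: rest => if PySem.Set.contains visited e = false then false else pvCheckExits visited rest

def validate_connectivity_py (terrain : List (List String)) (exit_positions : List (Int × Int)) : Bool :=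
  if exit_positions.length < 2 then true
  else
    let h : Int := (terrain.length : Int)
    let w : Int := match terrain with | [] => (0 : Int) | r :: _ => (r.length : Int)
    let start : Int × Int := (PySem.List.pyGet? exit_positions 0).getD (0, 0)  -- exact: list nonempty here
    let visited := pvBfsLoop terrain w h (PySem.Set.add PySem.Set.empty start) [start]
    pvCheckExits visited exit_positions

-- ===== PORT B =====

-- one sweep: the set comprehension collecting every unreached walkable cell adjacent to `reach`
def pvNewCells (terrain : List (List String)) (w h : Int) (reach : PySem.Set (Int × Int)) :
    List (Int × Int) :=
  (PySem.List.pyRange 0 h).flatMap (fun y =>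
    (PySem.List.pyRange 0 w).filterMap (fun x =>
      if PySem.Set.contains reach (x, y) = false ∧ pvWalk (pvCell terrain x y) = true ∧
          (pvDirs.any (fun d => PySem.Set.contains reach (x + d.1, y + d.2))) = true
      then some (x, y) else none))

-- B's `for _ in range(w*h): … if not new: break` loop
def pvSatLoop (terrain : List (List String)) (w h : Int) :
    Nat → PySem.Set (Int × Int) → PySem.Set (Int × Int)
  | 0, reach => reach
  | fuel + 1, reach =>
      let new := pvNewCells terrain w h reach
      if new.isEmpty then reach else pvSatLoop terrain w h fuel (PySem.Set.update reach new)

def validate_connectivity_py_alt (terrain : List (List String)) (exit_positions : List (Int × Int)) : Bool :=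
  if exit_positions.length < 2 then true
  else
    let h : Int := (terrain.length : Int)
    let w : Int := match terrain with | [] => (0 : Int) | r :: _ => (r.length : Int)
    let start : Int × Int := (PySem.List.pyGet? exit_positions 0).getD (0, 0)  -- exact: list nonempty here
    let reach := pvSatLoop terrain w h (w * h).toNat (PySem.Set.ofList [start])
    exit_positions.all (fun e => PySem.Set.contains reach e)

-- ===== PRECONDITION & SPEC =====
-- Pre_ excludes terrain with a row shorter than row 0 when there are ≥ 2 exits: there A's BFS can
-- index such a row past its length and raise IndexError (and B's full-grid sweep always does); on
-- some such inputs A still returns a value — see the excluded example in the claim's cites.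
def Pre_validate_connectivity_py (terrain : List (List String)) (exit_positions : List (Int × Int)) : Prop :=
  exit_positions.length < 2 ∨ ∀ row ∈ terrain, (terrain.headD []).length ≤ row.length
instance (terrain : List (List String)) (exit_positions : List (Int × Int)) : Decidable (Pre_validate_connectivity_py terrain exit_positions) := by unfold Pre_validate_connectivity_py; infer_instance

def pvWitness_validate_connectivity_py : List (List String) × (List (Int × Int)) :=
  ([["floor", "floor"]], [(0, 0), (1, 0)])

def Spec_validate_connectivity_py (terrain : List (List String)) (exit_positions : List (Int × Int)) (out : Bool) : Prop := out = validate_connectivity_py_alt terrain exit_positions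
instance (terrain : List (List String)) (exit_positions : List (Int × Int)) (out : Bool) : Decidable (Spec_validate_connectivity_py terrain exit_positions out) := by unfold Spec_validate_connectivity_py; infer_instance

-- ===== CLAIM (what is proved, stated in full; the proofs are below) =====
def Claim_equal_validate_connectivity_py : Prop := ∀ (terrain : List (List String)) (exit_positions : List (Int × Int)), Dom_validate_connectivity_py terrain exit_positions → Pre_validate_connectivity_py terrain exit_positions → Spec_validate_connectivity_py terrain exit_positions (validate_connectivity_py terrain exit_positions)

-- ===== LEMMAS AND PROOFS =====

-- the cell predicate both programs test: in bounds and walkable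
def pvOk (terrain : List (List String)) (w h : Int) (c : Int × Int) : Prop :=
  0 ≤ c.1 ∧ c.1 < w ∧ 0 ≤ c.2 ∧ c.2 < h ∧ pvWalk (pvCell terrain c.1 c.2) = true

lemma pvDirs_neg {d : Int × Int} (hd : d ∈ pvDirs) : ((-d.1, -d.2) : Int × Int) ∈ pvDirs := by
  simp [pvDirs] at hd ⊢
  rcases hd with h | h | h | h <;> rw [h] <;> simp

-- characterisation of a single neighbour probe
lemma pvStep_spec (terrain : List (List String)) (w h x y : Int)
    (v : PySem.Set (Int × Int)) (q : List (Int × Int)) (d : Int × Int) :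
    (∀ c, c ∈ (pvBfsStep terrain w h x y (v, q) d).1 ↔
        c ∈ v ∨ (c = (x + d.1, y + d.2) ∧ pvOk terrain w h c)) ∧
    (∃ e1, (pvBfsStep terrain w h x y (v, q) d).2 = q ++ e1 ∧
        ∀ c ∈ e1, c ∈ (pvBfsStep terrain w h x y (v, q) d).1) ∧
    (∀ c ∈ (pvBfsStep terrain w h x y (v, q) d).1,
        c ∈ v ∨ c ∈ (pvBfsStep terrain w h x y (v, q) d).2) := by
  simp only [pvBfsStep]
  split_ifs with h1 h2
  · obtain ⟨hx0, hxw, hy0, hyh, hcont⟩ := h1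
    refine ⟨?_, ⟨[(x + d.1, y + d.2)], rfl, ?_⟩, ?_⟩
    · intro c
      rw [PySem.Set.mem_add]
      constructor
      · rintro (hc | rfl)
        · exact Or.inl hc
        · exact Or.inr ⟨rfl, hx0, hxw, hy0, hyh, h2⟩
      · rintro (hc | ⟨rfl, _⟩)
        · exact Or.inl hc
        · exact Or.inr rfl
    · intro c hc
      rw [List.mem_singleton] at hc
      subst hc
      exact (PySem.Set.mem_add _ _ _).2 (Or.inr rfl)
    · intro c hc
      rcases (PySem.Set.mem_add _ _ _).1 hc with hc' | rfl
      · exact Or.inl hc'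
      · exact Or.inr (by simp)
  · refine ⟨?_, ⟨[], by simp, by simp⟩, fun c hc => Or.inl hc⟩
    intro c
    constructor
    · exact Or.inl
    · rintro (hc | ⟨rfl, hok⟩)
      · exact hc
      · exact absurd hok.2.2.2.2 h2
  · refine ⟨?_, ⟨[], by simp, by simp⟩, fun c hc => Or.inl hc⟩
    intro c
    constructor
    · exact Or.inl
    · rintro (hc | ⟨rfl, hok⟩)
      · exact hc
      · obtain ⟨a1, a2, a3, a4, _⟩ := hok
        have hct : PySem.Set.contains v (x + d.1, y + d.2) = true := by
          by_contra hcf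
          exact h1 ⟨a1, a2, a3, a4, by simpa using hcf⟩
        exact (PySem.Set.contains_iff _ _).1 hct

-- characterisation of one pass of A's inner neighbour loop
lemma pvFold_spec (terrain : List (List String)) (w h x y : Int) (ds : List (Int × Int))
    (v : PySem.Set (Int × Int)) (q : List (Int × Int)) :
    (∀ c, c ∈ (ds.foldl (pvBfsStep terrain w h x y) (v, q)).1 ↔
        c ∈ v ∨ ∃ d ∈ ds, c = (x + d.1, y + d.2) ∧ pvOk terrain w h c) ∧
    (∃ ex, (ds.foldl (pvBfsStep terrain w h x y) (v, q)).2 = q ++ ex ∧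
        ∀ c ∈ ex, c ∈ (ds.foldl (pvBfsStep terrain w h x y) (v, q)).1) ∧
    (∀ c ∈ (ds.foldl (pvBfsStep terrain w h x y) (v, q)).1,
        c ∈ v ∨ c ∈ (ds.foldl (pvBfsStep terrain w h x y) (v, q)).2) := by
  induction ds generalizing v q with
  | nil =>
    exact ⟨fun c => by simp, ⟨[], by simp, by simp⟩, fun c hc => Or.inl hc⟩
  | cons d ds ih =>
    rw [List.foldl_cons]
    obtain ⟨s1, ⟨e1, he1, he1m⟩, s3⟩ := pvStep_spec terrain w h x y v q d
    have hpair : (pvBfsStep terrain w h x y (v, q) d) =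
        ((pvBfsStep terrain w h x y (v, q) d).1, (pvBfsStep terrain w h x y (v, q) d).2) := rfl
    rw [hpair]
    obtain ⟨f1, ⟨ex, hex, hexm⟩, f3⟩ :=
      ih (pvBfsStep terrain w h x y (v, q) d).1 (pvBfsStep terrain w h x y (v, q) d).2
    refine ⟨?_, ⟨e1 ++ ex, ?_, ?_⟩, ?_⟩
    · intro c
      rw [f1, s1, List.exists_mem_cons_iff]
      tauto
    · rw [hex, he1, List.append_assoc]
    · intro c hc
      rcases List.mem_append.1 hc with hc' | hc'
      · exact (f1 c).2 (Or.inl (he1m c hc'))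
      · exact hexm c hc'
    · intro c hc
      rcases f3 c hc with hv' | hq'
      · rcases s3 c hv' with hv | hq'
        · exact Or.inl hv
        · right
          rw [hex]
          exact List.mem_append_left _ hq'
      · exact Or.inr hq'


lemma pvBfs_mono (terrain : List (List String)) (w h : Int) :
    ∀ v q (c : Int × Int), c ∈ v → c ∈ pvBfsLoop terrain w h v q := by
  intro v q
  induction v, q using pvBfsLoop.induct terrain w h with
  | case1 visited =>
    intro c hc
    rw [pvBfsLoop]
    exact hc
  | case2 visited x y rest st ih =>
    intro c hc
    rw [pvBfsLoop]
    exact ih c (((pvFold_spec terrain w h x y pvDirs visited rest).1 c).2 (Or.inl hc))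

lemma pvBfs_sound (terrain : List (List String)) (w h : Int) (P : Int × Int → Prop)
    (hP : ∀ p d, d ∈ pvDirs → P p → pvOk terrain w h (p.1 + d.1, p.2 + d.2) →
      P (p.1 + d.1, p.2 + d.2)) :
    ∀ v q, (∀ c ∈ v, P c) → (∀ c ∈ q, P c) → ∀ c ∈ pvBfsLoop terrain w h v q, P c := by
  intro v q
  induction v, q using pvBfsLoop.induct terrain w h with
  | case1 visited =>
    intro hv hq c hc
    rw [pvBfsLoop] at hc
    exact hv c hc
  | case2 visited x y rest st ih =>
    intro hv hq c hc
    rw [pvBfsLoop] at hc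
    obtain ⟨s1, ⟨ex, hex, hexm⟩, s3⟩ := pvFold_spec terrain w h x y pvDirs visited rest
    have hv' : ∀ c', c' ∈ (List.foldl (pvBfsStep terrain w h x y) (visited, rest) pvDirs).1 → P c' := by
      intro c' hc'
      rcases (s1 c').1 hc' with hcv | ⟨d, hd, hceq, hok⟩
      · exact hv c' hcv
      · subst hceq
        exact hP (x, y) d hd (hq (x, y) List.mem_cons_self) hok
    have hq' : ∀ c', c' ∈ (List.foldl (pvBfsStep terrain w h x y) (visited, rest) pvDirs).2 → P c' := by
      intro c' hc'
      rw [hex] at hc'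
      rcases List.mem_append.1 hc' with hcr | hcx
      · exact hq c' (List.mem_cons_of_mem _ hcr)
      · exact hv' c' (hexm c' hcx)
    exact ih hv' hq' c hc

lemma pvBfs_closed (terrain : List (List String)) (w h : Int) :
    ∀ v q, (∀ c ∈ q, c ∈ v) →
    (∀ c ∈ v, c ∈ q ∨ ∀ d ∈ pvDirs, pvOk terrain w h (c.1 + d.1, c.2 + d.2) →
        (c.1 + d.1, c.2 + d.2) ∈ v) →
    ∀ c ∈ pvBfsLoop terrain w h v q, ∀ d ∈ pvDirs,
      pvOk terrain w h (c.1 + d.1, c.2 + d.2) →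
      (c.1 + d.1, c.2 + d.2) ∈ pvBfsLoop terrain w h v q := by
  intro v q
  induction v, q using pvBfsLoop.induct terrain w h with
  | case1 visited =>
    intro hqv hinv c hc d hd hok
    rw [pvBfsLoop] at hc ⊢
    rcases hinv c hc with hcq | hcl
    · simp at hcq
    · exact hcl d hd hok
  | case2 visited x y rest st ih =>
    intro hqv hinv
    rw [pvBfsLoop]
    obtain ⟨s1, ⟨ex, hex, hexm⟩, s3⟩ := pvFold_spec terrain w h x y pvDirs visited rest
    apply ih
    · intro c hc
      rw [hex] at hc
      rcases List.mem_append.1 hc with hcr | hcx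
      · exact (s1 c).2 (Or.inl (hqv c (List.mem_cons_of_mem _ hcr)))
      · exact hexm c hcx
    · intro c hc
      rcases s3 c hc with hcv | hcq
      · rcases hinv c hcv with hcq | hcl
        · rcases List.mem_cons.1 hcq with rfl | hcrest
          · right
            intro d hd hok
            exact (s1 _).2 (Or.inr ⟨d, hd, rfl, hok⟩)
          · left
            rw [hex]
            exact List.mem_append_left _ hcrest
        · right
          intro d hd hok
          exact (s1 _).2 (Or.inl (hcl d hd hok))
      · exact Or.inl hcq

lemma pvNewCells_mem (terrain : List (List String)) (w h : Int)
    (reach : PySem.Set (Int × Int)) (c : Int × Int) :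
    c ∈ pvNewCells terrain w h reach ↔
      pvOk terrain w h c ∧ c ∉ reach ∧ ∃ d ∈ pvDirs, (c.1 + d.1, c.2 + d.2) ∈ reach := by
  simp only [pvNewCells, List.mem_flatMap, List.mem_filterMap, PySem.List.mem_pyRange_one]
  constructor
  · rintro ⟨y, hy, x, hx, hsome⟩
    split_ifs at hsome with hcond
    · obtain ⟨hc1, hc2, hc3⟩ := hcond
      injection hsome with heq
      subst heq
      refine ⟨⟨hx.1, hx.2, hy.1, hy.2, hc2⟩, ?_, ?_⟩
      · intro hmem
        rw [(PySem.Set.contains_iff _ _).2 hmem] at hc1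
        cases hc1
      · obtain ⟨d, hd, hdc⟩ := List.any_eq_true.1 hc3
        exact ⟨d, hd, (PySem.Set.contains_iff _ _).1 hdc⟩
  · rintro ⟨⟨h1, h2, h3, h4, h5⟩, hnr, d, hd, hdr⟩
    refine ⟨c.2, ⟨h3, h4⟩, c.1, ⟨h1, h2⟩, ?_⟩
    have hcond : PySem.Set.contains reach (c.1, c.2) = false ∧
        pvWalk (pvCell terrain c.1 c.2) = true ∧
        (pvDirs.any (fun d => PySem.Set.contains reach (c.1 + d.1, c.2 + d.2))) = true := by
      refine ⟨?_, h5, ?_⟩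
      · rcases hb : PySem.Set.contains reach (c.1, c.2) with _ | _
        · rfl
        · exact absurd (by simpa using (PySem.Set.contains_iff _ _).1 hb) hnr
      · exact List.any_eq_true.2 ⟨d, hd, (PySem.Set.contains_iff _ _).2 hdr⟩
    rw [if_pos hcond]

lemma pvSat_mono (terrain : List (List String)) (w h : Int) :
    ∀ fuel reach (c : Int × Int), c ∈ reach → c ∈ pvSatLoop terrain w h fuel reach := by
  intro fuel
  induction fuel with
  | zero =>
    intro reach c hc
    rw [pvSatLoop]
    exact hc
  | succ n ih =>
    intro reach c hc
    rw [pvSatLoop]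
    split_ifs with hemp
    · exact hc
    · exact ih _ c ((PySem.Set.mem_update _ _ _).2 (Or.inl hc))

lemma pvSat_sound (terrain : List (List String)) (w h : Int) (P : Int × Int → Prop)
    (hP : ∀ c, pvOk terrain w h c → (∃ d ∈ pvDirs, P (c.1 + d.1, c.2 + d.2)) → P c) :
    ∀ fuel reach, (∀ c ∈ reach, P c) → ∀ c ∈ pvSatLoop terrain w h fuel reach, P c := by
  intro fuel
  induction fuel with
  | zero =>
    intro reach hreach c hc
    rw [pvSatLoop] at hc
    exact hreach c hc
  | succ n ih =>
    intro reach hreach c hc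
    rw [pvSatLoop] at hc
    split_ifs at hc with hemp
    · exact hreach c hc
    · refine ih _ ?_ c hc
      intro z hz
      rcases (PySem.Set.mem_update _ _ _).1 hz with hzr | hzn
      · exact hreach z hzr
      · obtain ⟨hok, hnr, d, hd, hdr⟩ := (pvNewCells_mem terrain w h reach z).1 hzn
        exact hP z hok ⟨d, hd, hreach _ hdr⟩

lemma pvSat_closed (terrain : List (List String)) (w h : Int) :
    ∀ fuel reach, pvUnvis w h reach ≤ fuel →
      pvNewCells terrain w h (pvSatLoop terrain w h fuel reach) = [] := by
  intro fuel
  induction fuel with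
  | zero =>
    intro reach hle
    rw [pvSatLoop]
    rw [List.eq_nil_iff_forall_not_mem]
    intro c hc
    obtain ⟨hok, hnr, _⟩ := (pvNewCells_mem terrain w h reach c).1 hc
    have hcell : c ∈ pvCells w h := mem_pvCells.2 ⟨hok.1, hok.2.1, hok.2.2.1, hok.2.2.2.1⟩
    have h0 : pvUnvis w h reach = 0 := Nat.le_zero.1 hle
    have := List.countP_eq_zero.1 h0 c hcell
    simp only [Bool.not_eq_true'] at this
    exact hnr ((PySem.Set.contains_iff _ _).1 (by simpa using this))
  | succ n ih =>
    intro reach hle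
    rw [pvSatLoop]
    split_ifs with hemp
    · exact List.isEmpty_iff.1 hemp
    · apply ih
      have hne : pvNewCells terrain w h reach ≠ [] := by
        simpa [List.isEmpty_iff] using hemp
      obtain ⟨c0, hc0⟩ := List.exists_mem_of_ne_nil _ hne
      obtain ⟨hok, hnr, _⟩ := (pvNewCells_mem terrain w h reach c0).1 hc0
      have hlt : pvUnvis w h (PySem.Set.update reach (pvNewCells terrain w h reach)) <
          pvUnvis w h reach := by
        apply pvCountPLt _ _ _ ?mono c0 ?memc ?pc ?p'c
        case mono =>
          intro z hz
          simp only [Bool.not_eq_true'] at hz ⊢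
          rcases hb : PySem.Set.contains reach z with _ | _
          · rfl
          · exfalso
            have : z ∈ PySem.Set.update reach (pvNewCells terrain w h reach) :=
              (PySem.Set.mem_update _ _ _).2 (Or.inl ((PySem.Set.contains_iff _ _).1 hb))
            rw [(PySem.Set.contains_iff _ _).2 this] at hz
            cases hz
        case memc => exact mem_pvCells.2 ⟨hok.1, hok.2.1, hok.2.2.1, hok.2.2.2.1⟩
        case pc =>
          simp only [Bool.not_eq_true']
          rcases hb : PySem.Set.contains reach c0 with _ | _
          · rfl
          · exact absurd ((PySem.Set.contains_iff _ _).1 hb) hnr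
        case p'c =>
          have hm : c0 ∈ PySem.Set.update reach (pvNewCells terrain w h reach) :=
            (PySem.Set.mem_update _ _ _).2 (Or.inr hc0)
          show (!PySem.Set.contains (PySem.Set.update reach (pvNewCells terrain w h reach)) c0) = false
          rw [(PySem.Set.contains_iff _ _).2 hm]
          rfl
      omega

lemma pvCells_length (w h : Int) : (pvCells w h).length = h.toNat * w.toNat := by
  simp [pvCells, List.length_flatMap, pysem]

-- the two reached sets have the same members
lemma pvMainMem (terrain : List (List String)) (w h : Int) (hw : 0 ≤ w) (hh : 0 ≤ h)
    (s : Int × Int) (c : Int × Int) :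
    c ∈ pvBfsLoop terrain w h (PySem.Set.add PySem.Set.empty s) [s] ↔
      c ∈ pvSatLoop terrain w h (w * h).toNat (PySem.Set.ofList [s]) := by
  have hfuel : pvUnvis w h (PySem.Set.ofList [s]) ≤ (w * h).toNat := by
    have h1 : pvUnvis w h (PySem.Set.ofList [s]) ≤ (pvCells w h).length :=
      List.countP_le_length
    rw [pvCells_length] at h1
    obtain ⟨a, rfl⟩ := Int.eq_ofNat_of_zero_le hw
    obtain ⟨b, rfl⟩ := Int.eq_ofNat_of_zero_le hh
    rw [← Int.natCast_mul, Int.toNat_natCast]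
    simp only [Int.toNat_natCast] at h1
    exact h1.trans_eq (Nat.mul_comm b a)
  have hSclosed : ∀ c', pvOk terrain w h c' →
      (∃ d ∈ pvDirs, (c'.1 + d.1, c'.2 + d.2) ∈
        pvSatLoop terrain w h (w * h).toNat (PySem.Set.ofList [s])) →
      c' ∈ pvSatLoop terrain w h (w * h).toNat (PySem.Set.ofList [s]) := by
    intro c' hok hadj
    by_contra hc'
    have hmem : c' ∈ pvNewCells terrain w h
        (pvSatLoop terrain w h (w * h).toNat (PySem.Set.ofList [s])) :=
      (pvNewCells_mem _ _ _ _ _).2 ⟨hok, hc', hadj⟩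
    rw [pvSat_closed terrain w h _ _ hfuel] at hmem
    cases hmem
  have hq0 : ∀ z ∈ [s], z ∈ PySem.Set.add PySem.Set.empty s := by
    intro z hz
    rw [List.mem_singleton] at hz
    subst hz
    exact (PySem.Set.mem_add _ _ _).2 (Or.inr rfl)
  have hinv0 : ∀ z ∈ PySem.Set.add PySem.Set.empty s, z ∈ [s] ∨
      ∀ d ∈ pvDirs, pvOk terrain w h (z.1 + d.1, z.2 + d.2) →
        (z.1 + d.1, z.2 + d.2) ∈ PySem.Set.add PySem.Set.empty s := by
    intro z hz
    rcases (PySem.Set.mem_add _ _ _).1 hz with hze | rfl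
    · cases hze
    · exact Or.inl (List.mem_singleton.2 rfl)
  have hVstart : s ∈ pvBfsLoop terrain w h (PySem.Set.add PySem.Set.empty s) [s] :=
    pvBfs_mono terrain w h _ _ s ((PySem.Set.mem_add _ _ _).2 (Or.inr rfl))
  have hVclosed := pvBfs_closed terrain w h _ _ hq0 hinv0
  have hSstart : s ∈ pvSatLoop terrain w h (w * h).toNat (PySem.Set.ofList [s]) :=
    pvSat_mono terrain w h _ _ s ((PySem.Set.mem_ofList _ _).2 (List.mem_singleton.2 rfl))
  constructor
  · intro hcV
    refine pvBfs_sound terrain w h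
      (fun z => z ∈ pvSatLoop terrain w h (w * h).toNat (PySem.Set.ofList [s])) ?_ _ _ ?_ ?_ c hcV
    · intro p d hd hp hok
      apply hSclosed _ hok
      refine ⟨(-d.1, -d.2), pvDirs_neg hd, ?_⟩
      simpa using hp
    · intro z hz
      rcases (PySem.Set.mem_add _ _ _).1 hz with hze | rfl
      · cases hze
      · exact hSstart
    · intro z hz
      rw [List.mem_singleton] at hz
      subst hz
      exact hSstart
  · intro hcS
    refine pvSat_sound terrain w h
      (fun z => z ∈ pvBfsLoop terrain w h (PySem.Set.add PySem.Set.empty s) [s]) ?_ _ _ ?_ c hcS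
    · rintro z hok ⟨d, hd, hzd⟩
      have hres := hVclosed _ hzd (-d.1, -d.2) (pvDirs_neg hd) (by simpa using hok)
      simpa using hres
    · intro z hz
      rw [PySem.Set.mem_ofList, List.mem_singleton] at hz
      subst hz
      exact hVstart

lemma pvCheckExits_eq_all (v : PySem.Set (Int × Int)) :
    ∀ l, pvCheckExits v l = l.all (fun e => PySem.Set.contains v e) := by
  intro l
  induction l with
  | nil => rfl
  | cons e rest ih =>
    rw [pvCheckExits, List.all_cons, ih]
    cases PySem.Set.contains v e <;> simp

lemma pvAllCongr {l : List (Int × Int)} {f g : Int × Int → Bool}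
    (h : ∀ x ∈ l, f x = g x) : l.all f = l.all g := by
  induction l with
  | nil => rfl
  | cons a t ih =>
    rw [List.all_cons, List.all_cons, h a List.mem_cons_self,
      ih (fun x hx => h x (List.mem_cons_of_mem _ hx))]

-- ===== VERDICT (by name: the statement is the Claim_ definition above) =====
theorem validate_connectivity_py_spec : Claim_equal_validate_connectivity_py := by
  intro terrain exits _hDom _hPre
  unfold Spec_validate_connectivity_py validate_connectivity_py validate_connectivity_py_alt
  by_cases hlen : exits.length < 2
  · simp [hlen]
  · simp only [if_neg hlen]
    have hw : 0 ≤ (match terrain with | [] => (0 : Int) | r :: _ => ((r.length : Int))) := by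
      cases terrain <;> simp
    have hh : 0 ≤ (terrain.length : Int) := by positivity
    rw [pvCheckExits_eq_all]
    apply pvAllCongr
    intro e _
    apply Bool.coe_iff_coe.mp
    rw [PySem.Set.contains_iff, PySem.Set.contains_iff]
    exact pvMainMem terrain _ _ hw hh _ e
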